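-- pv_equiv track=rewrite | github.com/porosya80/checkio | Escher/the_ship_teams.py | two_teams
-- ===== SOURCE A (Python) =====
-- def two_teams(sailors: dict):
--
--     ship1, ship2 = [], []
--     for sail, age in sailors.items():
--         if 20 <= age <= 40:
--             ship2.append(sail)
--         else:
--             ship1.append(sail)
--     return [
--         sorted(ship1),
--         sorted(ship2)
--     ]
-- ===== SOURCE B (Python) =====
-- def two_teams(sailors: dict):
--     # Single pass: keep each team permanently sorted by splicing every name in
--     # at the position found by a hand-written binary search (binary insertion
--     # sort interleaved with the partition); no call to sorted() at all.
--     def place(team, name):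
--         lo, hi = 0, len(team)
--         while lo < hi:
--             mid = (lo + hi) // 2
--             if team[mid] < name:
--                 lo = mid + 1
--             else:
--                 hi = mid
--         team.insert(lo, name)
--         return team
--     ship1, ship2 = [], []
--     for sail, age in sailors.items():
--         if 20 <= age <= 40:
--             ship2 = place(ship2, sail)
--         else:
--             ship1 = place(ship1, sail)
--     return [ship1, ship2]
-- ===== Notes on version B (the rewrite author's own statement) =====
-- stated objective: alternative
-- what changed: B never calls sorted(): it keeps each team permanently sorted during a single pass by inserting every name at the position found by a hand-written binary search (binary insertion sort interleaved with the partition), instead of A's partition pass followed by two library sorts.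
import Mathlib
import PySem

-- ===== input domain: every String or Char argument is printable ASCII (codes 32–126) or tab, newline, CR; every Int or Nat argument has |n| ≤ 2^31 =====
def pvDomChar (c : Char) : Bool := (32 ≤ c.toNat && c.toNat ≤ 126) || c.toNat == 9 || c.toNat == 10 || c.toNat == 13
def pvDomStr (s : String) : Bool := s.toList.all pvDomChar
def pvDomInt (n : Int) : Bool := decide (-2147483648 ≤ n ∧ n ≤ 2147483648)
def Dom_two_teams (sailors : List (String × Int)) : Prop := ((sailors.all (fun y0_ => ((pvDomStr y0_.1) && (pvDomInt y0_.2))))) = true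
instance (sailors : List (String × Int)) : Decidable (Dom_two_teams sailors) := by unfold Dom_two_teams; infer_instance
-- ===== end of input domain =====

-- B replaces A's partition-then-two-sorts by a single pass that keeps each team permanently
-- sorted, inserting every name at its sorted position (online insertion sort, no sorted() call);
-- same results, a different algorithm of higher asymptotic cost.

-- ===== PORT A =====
-- partition first (insertion order), then sort each team
def two_teams (sailors : List (String × Int)) : List (List String) :=
  let p := sailors.foldl
    (fun (acc : List String × List String) kv =>
      if 20 ≤ kv.2 ∧ kv.2 ≤ 40 then (acc.1, acc.2 ++ [kv.1]) else (acc.1 ++ [kv.1], acc.2))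
    ([], [])
  [PySem.List.sorted p.1 (fun x => x) false, PySem.List.sorted p.2 (fun x => x) false]

-- ===== PORT B =====
-- bpos: the while loop 'lo, hi = 0, len(team); while lo < hi: …', step for step; the index
-- mid always satisfies lo ≤ mid < hi ≤ len(team), so team[mid] never raises and getD's
-- default is unreachable.
def bpos (team : List String) (name : String) (lo hi : Nat) : Nat :=
  if h : lo < hi then
    let mid := (lo + hi) / 2
    if team.getD mid "" < name then bpos team name (mid + 1) hi
    else bpos team name lo mid
  else lo
termination_by hi - lo
decreasing_by all_goals omega

-- team.insert(lo, name); return team — functionally, team[:lo] + [name] + team[lo:]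
def place (team : List String) (name : String) : List String :=
  let lo := bpos team name 0 team.length
  team.take lo ++ [name] ++ team.drop lo

def two_teams_alt (sailors : List (String × Int)) : List (List String) :=
  let p := sailors.foldl
    (fun (acc : List String × List String) kv =>
      if 20 ≤ kv.2 ∧ kv.2 ≤ 40 then (acc.1, place acc.2 kv.1) else (place acc.1 kv.1, acc.2))
    ([], [])
  [p.1, p.2]

-- ===== PRECONDITION & SPEC =====
-- The argument is a Python dict, whose keys are necessarily distinct; a list with duplicate
-- names encodes no dict, so Pre_ admits exactly the lists that represent a dict value.
def Pre_two_teams (sailors : List (String × Int)) : Prop := (sailors.map Prod.fst).Nodup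
instance (sailors : List (String × Int)) : Decidable (Pre_two_teams sailors) := by unfold Pre_two_teams; infer_instance
def pvWitness_two_teams : (List (String × Int)) := [("bob", 22), ("ann", 50), ("joe", 17)]

def Spec_two_teams (sailors : List (String × Int)) (out : List (List String)) : Prop := out = two_teams_alt sailors
instance (sailors : List (String × Int)) (out : List (List String)) : Decidable (Spec_two_teams sailors out) := by unfold Spec_two_teams; infer_instance

-- ===== CLAIM (what is proved, stated in full; the proofs are below) =====
def Claim_equal_two_teams : Prop := ∀ (sailors : List (String × Int)), Dom_two_teams sailors → Pre_two_teams sailors → Spec_two_teams sailors (two_teams sailors)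

-- ===== LEMMAS AND PROOFS =====

-- splicing at the takeWhile/dropWhile split is ordered insertion
theorem splice_eq_orderedInsert (team : List String) (name : String) :
    team.takeWhile (fun x => decide (x < name)) ++ [name]
      ++ team.dropWhile (fun x => decide (x < name))
    = List.orderedInsert (· ≤ ·) name team := by
  induction team with
  | nil => rfl
  | cons x t ih =>
    by_cases h : x < name
    · have ht : List.takeWhile (fun y => decide (y < name)) (x :: t)
          = x :: List.takeWhile (fun y => decide (y < name)) t :=
        List.takeWhile_cons_of_pos (decide_eq_true h)
      have hw : List.dropWhile (fun y => decide (y < name)) (x :: t)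
          = List.dropWhile (fun y => decide (y < name)) t :=
        List.dropWhile_cons_of_pos (decide_eq_true h)
      rw [ht, hw, List.orderedInsert, if_neg (not_le.mpr h)]
      simpa using congrArg (x :: ·) ih
    · have ht : List.takeWhile (fun y => decide (y < name)) (x :: t) = [] :=
        List.takeWhile_cons_of_neg (fun hc => h (of_decide_eq_true hc))
      have hw : List.dropWhile (fun y => decide (y < name)) (x :: t) = x :: t :=
        List.dropWhile_cons_of_neg (fun hc => h (of_decide_eq_true hc))
      rw [ht, hw, List.orderedInsert, if_pos (not_lt.mp h)]
      simp

-- A's partition loop, characterised as two filters of the input list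
theorem foldlA_eq (l : List (String × Int)) (acc : List String × List String) :
    l.foldl
      (fun (acc : List String × List String) kv =>
        if 20 ≤ kv.2 ∧ kv.2 ≤ 40 then (acc.1, acc.2 ++ [kv.1]) else (acc.1 ++ [kv.1], acc.2))
      acc
    = (acc.1 ++ (l.filter (fun kv => !decide (20 ≤ kv.2 ∧ kv.2 ≤ 40))).map Prod.fst,
       acc.2 ++ (l.filter (fun kv => decide (20 ≤ kv.2 ∧ kv.2 ≤ 40))).map Prod.fst) := by
  induction l generalizing acc with
  | nil => simp
  | cons kv t ih =>
    rw [List.foldl_cons]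
    by_cases h : 20 ≤ kv.2 ∧ kv.2 ≤ 40
    · simp [h, ih]
    · rcases not_and_or.mp h with h' | h' <;> simp [h', ih]

-- B's loop, characterised: each component is place folded over its filtered name list
theorem foldlB_eq (l : List (String × Int)) (acc : List String × List String) :
    l.foldl
      (fun (acc : List String × List String) kv =>
        if 20 ≤ kv.2 ∧ kv.2 ≤ 40 then (acc.1, place acc.2 kv.1) else (place acc.1 kv.1, acc.2))
      acc
    = (((l.filter (fun kv => !decide (20 ≤ kv.2 ∧ kv.2 ≤ 40))).map Prod.fst).foldl place acc.1,
       ((l.filter (fun kv => decide (20 ≤ kv.2 ∧ kv.2 ≤ 40))).map Prod.fst).foldl place acc.2) := by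
  induction l generalizing acc with
  | nil => simp
  | cons kv t ih =>
    rw [List.foldl_cons]
    by_cases h : 20 ≤ kv.2 ∧ kv.2 ≤ 40
    · simp [h, ih]
    · rcases not_and_or.mp h with h' | h' <;> simp [h', ih]

-- taking/dropping at the takeWhile length is takeWhile/dropWhile
theorem take_drop_at_takeWhile (p : String → Bool) (l : List String) :
    l.take (l.takeWhile p).length = l.takeWhile p
      ∧ l.drop (l.takeWhile p).length = l.dropWhile p := by
  induction l with
  | nil => simp
  | cons x t ih =>
    by_cases h : p x
    · rw [List.takeWhile_cons_of_pos h, List.dropWhile_cons_of_pos h]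
      simp [ih.1, ih.2]
    · rw [List.takeWhile_cons_of_neg (by simp [h]), List.dropWhile_cons_of_neg (by simp [h])]
      simp

-- on a sorted list, bpos returns the length of the (· < name) prefix: the binary search
-- maintains 'everything below lo is < name, everything from hi on is not'
theorem bpos_eq (team : List String) (name : String) (hs : team.Pairwise (· ≤ ·)) :
    ∀ lo hi, lo ≤ hi → hi ≤ team.length →
    (∀ j (hj : j < team.length), j < lo → team[j] < name) →
    (∀ j (hj : j < team.length), hi ≤ j → ¬ team[j] < name) →
    bpos team name lo hi = (team.takeWhile (fun x => decide (x < name))).length := by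
  intro lo hi
  induction hn : hi - lo using Nat.strong_induction_on generalizing lo hi with
  | _ n ih =>
    intro hlohi hhi h1 h2
    rw [bpos]
    by_cases h : lo < hi
    · rw [dif_pos h]
      have hmidlt : (lo + hi) / 2 < hi := by omega
      have hmidlen : (lo + hi) / 2 < team.length := by omega
      have hmidlo : lo ≤ (lo + hi) / 2 := by omega
      have hget : team.getD ((lo + hi) / 2) "" = team[(lo + hi) / 2] :=
        List.getD_eq_getElem team "" hmidlen
      by_cases hc : team.getD ((lo + hi) / 2) "" < name
      · rw [if_pos hc]
        refine ih (hi - ((lo + hi) / 2 + 1)) (by omega) _ _ rfl (by omega) hhi ?_ h2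
        intro j hj hjlt
        rcases Nat.lt_or_ge j lo with hl | hl
        · exact h1 j hj hl
        · rcases Nat.lt_or_ge j ((lo + hi) / 2) with he | he
          · have := List.pairwise_iff_getElem.mp hs j ((lo + hi) / 2) hj hmidlen he
            exact lt_of_le_of_lt this (hget ▸ hc)
          · have : j = (lo + hi) / 2 := by omega
            subst this; exact hget ▸ hc
      · rw [if_neg hc]
        refine ih (((lo + hi) / 2) - lo) (by omega) _ _ rfl (by omega) (by omega) h1 ?_
        intro j hj hjge
        rcases Nat.lt_or_ge j hi with hl | hl
        · rcases Nat.lt_or_ge ((lo + hi) / 2) j with he | he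
          · have hle := List.pairwise_iff_getElem.mp hs ((lo + hi) / 2) j hmidlen hj he
            intro hcon
            exact hc (hget ▸ lt_of_le_of_lt hle hcon)
          · have : j = (lo + hi) / 2 := by omega
            subst this; exact hget ▸ hc
        · exact h2 j hj hl
    · rw [dif_neg h]
      have hle : lo = hi := by omega
      subst hle
      -- lo splits the list at exactly the (· < name) prefix
      clear ih hn h
      induction team generalizing lo with
      | nil => simp_all
      | cons x t iht =>
        cases lo with
        | zero =>
          have hx := h2 0 (by simp) (Nat.le_refl 0)
          simp only [List.getElem_cons_zero] at hx
          have ht : List.takeWhile (fun y => decide (y < name)) (x :: t) = [] :=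
            List.takeWhile_cons_of_neg (fun hc => hx (of_decide_eq_true hc))
          rw [ht]
          rfl
        | succ k =>
          have hx := h1 0 (by simp) (Nat.succ_pos k)
          simp only [List.getElem_cons_zero] at hx
          have ht : List.takeWhile (fun y => decide (y < name)) (x :: t)
              = x :: List.takeWhile (fun y => decide (y < name)) t :=
            List.takeWhile_cons_of_pos (decide_eq_true hx)
          rw [ht]
          have hk := iht (List.Pairwise.sublist (List.sublist_cons_self x t) hs) k
            (fun j hj hjk => by simpa using h1 (j + 1) (by simpa using hj) (by omega))
            (Nat.le_refl k)
            (by simpa using hhi)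
            (fun j hj hjk => by simpa using h2 (j + 1) (by simpa using hj) (by omega))
          rw [List.length_cons, ← hk]

-- hence, on a sorted list, place is ordered insertion
theorem place_eq_orderedInsert (team : List String) (name : String)
    (hs : team.Pairwise (· ≤ ·)) :
    place team name = List.orderedInsert (· ≤ ·) name team := by
  rw [place]
  have hb : bpos team name 0 team.length
      = (team.takeWhile (fun x => decide (x < name))).length :=
    bpos_eq team name hs 0 team.length (Nat.zero_le _) (Nat.le_refl _)
      (fun j hj hle => by omega) (fun j hj hle => by omega)
  rw [hb, (take_drop_at_takeWhile _ team).1, (take_drop_at_takeWhile _ team).2]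
  exact splice_eq_orderedInsert team name

-- folding place keeps the accumulator sorted and appends the names as a multiset
theorem foldl_place_props (names : List String) (acc : List String)
    (h : acc.Pairwise (· ≤ ·)) :
    (names.foldl place acc).Pairwise (· ≤ ·) ∧ (names.foldl place acc).Perm (acc ++ names) := by
  induction names generalizing acc with
  | nil => simpa using h
  | cons n t ih =>
    rw [List.foldl_cons, place_eq_orderedInsert _ _ h]
    obtain ⟨hp, hq⟩ := ih _ (List.Pairwise.orderedInsert n acc h)
    refine ⟨hp, hq.trans ?_⟩
    exact ((List.perm_orderedInsert _ n acc).append_right t).trans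
      (by simpa using (List.perm_middle (a := n) (l₁ := acc) (l₂ := t)).symm)

-- hence folding place from [] IS Python's sorted
theorem foldl_place_eq_sorted (names : List String) :
    names.foldl place [] = PySem.List.sorted names (fun x => x) false := by
  obtain ⟨hp, hq⟩ := foldl_place_props names [] List.Pairwise.nil
  exact (PySem.List.sorted_id_eq_of_perm_of_pairwise names (names.foldl place [])
    (hq.trans (by simp)) hp).symm

-- ===== VERDICT (by name: the statement is the Claim_ definition above) =====
theorem two_teams_spec : Claim_equal_two_teams := by
  intro sailors _ _
  unfold Spec_two_teams two_teams two_teams_alt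
  simp only [foldlA_eq, foldlB_eq, List.nil_append, foldl_place_eq_sorted]
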